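-- pv_equiv track=rewrite | github.com/ho0haha/2026-offsite-ai-challenges | 19-roy-g-biv/generate_challenge.py | get_number_bitmap
-- ===== SOURCE A (Python) =====
-- FONT_5x7 = {
--     0: [0b01110,0b10001,0b10011,0b10101,0b11001,0b10001,0b01110],
--     1: [0b00100,0b01100,0b00100,0b00100,0b00100,0b00100,0b01110],
--     2: [0b01110,0b10001,0b00001,0b00010,0b00100,0b01000,0b11111],
--     3: [0b01110,0b10001,0b00001,0b00110,0b00001,0b10001,0b01110],
--     4: [0b00010,0b00110,0b01010,0b10010,0b11111,0b00010,0b00010],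
--     5: [0b11111,0b10000,0b11110,0b00001,0b00001,0b10001,0b01110],
--     6: [0b00110,0b01000,0b10000,0b11110,0b10001,0b10001,0b01110],
--     7: [0b11111,0b00001,0b00010,0b00100,0b01000,0b01000,0b01000],
--     8: [0b01110,0b10001,0b10001,0b01110,0b10001,0b10001,0b01110],
--     9: [0b01110,0b10001,0b10001,0b01111,0b00001,0b00010,0b01100],
-- }
--
-- def get_number_bitmap(number, scale=3):
--     d1, d2 = number // 10, number % 10
--     gap = scale
--     rows = []
--     for r in range(7):
--         row = []
--         for col in range(5):
--             row.extend([bool((FONT_5x7[d1][r] >> (4-col)) & 1)] * scale)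
--         row.extend([False] * gap)
--         for col in range(5):
--             row.extend([bool((FONT_5x7[d2][r] >> (4-col)) & 1)] * scale)
--         for _ in range(scale):
--             rows.append(row[:])
--     return rows
-- ===== SOURCE B (Python) =====
-- FONT_5x7 = {
--     0: [0b01110,0b10001,0b10011,0b10101,0b11001,0b10001,0b01110],
--     1: [0b00100,0b01100,0b00100,0b00100,0b00100,0b00100,0b01110],
--     2: [0b01110,0b10001,0b00001,0b00010,0b00100,0b01000,0b11111],
--     3: [0b01110,0b10001,0b00001,0b00110,0b00001,0b10001,0b01110],
--     4: [0b00010,0b00110,0b01010,0b10010,0b11111,0b00010,0b00010],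
--     5: [0b11111,0b10000,0b11110,0b00001,0b00001,0b10001,0b01110],
--     6: [0b00110,0b01000,0b10000,0b11110,0b10001,0b10001,0b01110],
--     7: [0b11111,0b00001,0b00010,0b00100,0b01000,0b01000,0b01000],
--     8: [0b01110,0b10001,0b10001,0b01110,0b10001,0b10001,0b01110],
--     9: [0b01110,0b10001,0b10001,0b01111,0b00001,0b00010,0b01100],
-- }
--
-- def get_number_bitmap(number, scale=3):
--     d1, d2 = divmod(number, 10)
--     # bit-pack each font row: 5 bits of d1, one zero gap bit, 5 bits of d2 -> an 11-bit pattern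
--     patterns = [(FONT_5x7[d1][r] << 6) | FONT_5x7[d2][r] for r in range(7)]
--     # coordinate mapping: output pixel (y, x) reads logical cell (y // scale, x // scale)
--     return [
--         [bool((patterns[y // scale] >> (10 - x // scale)) & 1) for x in range(11 * scale)]
--         for y in range(7 * scale)
--     ]
-- ===== Notes on version B (the rewrite author's own statement) =====
-- stated objective: alternative
-- what changed: B bit-packs each font row into a single 11-bit pattern (5 bits of d1, a zero gap bit, 5 bits of d2) and then fills the output by coordinate mapping -- pixel (y, x) reads bit (10 - x//scale) of pattern y//scale -- instead of A's incremental row construction via nested extend loops and repeated row appends.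
import Mathlib
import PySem

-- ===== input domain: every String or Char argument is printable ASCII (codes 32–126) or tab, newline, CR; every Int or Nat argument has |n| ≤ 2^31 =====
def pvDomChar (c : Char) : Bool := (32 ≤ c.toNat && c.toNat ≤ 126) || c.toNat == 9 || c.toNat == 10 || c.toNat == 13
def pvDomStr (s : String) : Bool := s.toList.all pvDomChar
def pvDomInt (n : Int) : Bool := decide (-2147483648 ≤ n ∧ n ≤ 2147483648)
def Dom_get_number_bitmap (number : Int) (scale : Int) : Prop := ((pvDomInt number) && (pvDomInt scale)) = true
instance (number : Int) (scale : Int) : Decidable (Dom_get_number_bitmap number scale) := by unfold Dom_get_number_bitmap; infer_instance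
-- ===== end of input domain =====

-- B bit-packs each font row into one 11-bit pattern (digit, zero gap bit, digit) and then fills
-- the output by coordinate mapping: pixel (y, x) reads bit (10 - x//scale) of pattern y//scale,
-- instead of A's incremental row building with extend and repeated appends; objective: alternative.

-- the module-level constant FONT_5x7 (shared module context of both Source A and Source B);
-- dict lookup: defined keys are 0..9, any other key is a Python KeyError (excluded by Pre_)
def fontRows (d : Int) : List Nat :=
  if d = 0 then [0b01110,0b10001,0b10011,0b10101,0b11001,0b10001,0b01110]
  else if d = 1 then [0b00100,0b01100,0b00100,0b00100,0b00100,0b00100,0b01110]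
  else if d = 2 then [0b01110,0b10001,0b00001,0b00010,0b00100,0b01000,0b11111]
  else if d = 3 then [0b01110,0b10001,0b00001,0b00110,0b00001,0b10001,0b01110]
  else if d = 4 then [0b00010,0b00110,0b01010,0b10010,0b11111,0b00010,0b00010]
  else if d = 5 then [0b11111,0b10000,0b11110,0b00001,0b00001,0b10001,0b01110]
  else if d = 6 then [0b00110,0b01000,0b10000,0b11110,0b10001,0b10001,0b01110]
  else if d = 7 then [0b11111,0b00001,0b00010,0b00100,0b01000,0b01000,0b01000]
  else if d = 8 then [0b01110,0b10001,0b10001,0b01110,0b10001,0b10001,0b01110]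
  else if d = 9 then [0b01110,0b10001,0b10001,0b01111,0b00001,0b00010,0b01100]
  else []

-- ===== PORT A =====
-- [x] * scale / [False] * gap: Python list repetition, empty for scale ≤ 0 (hence toNat)
def get_number_bitmap (number : Int) (scale : Int) : List (List Bool) :=
  let d1 := PySem.Int.floordiv number 10
  let d2 := PySem.Int.mod number 10
  let gap := scale
  (PySem.List.pyRange 0 7 1).foldl (fun rows r =>
    let row : List Bool := []
    let row := (PySem.List.pyRange 0 5 1).foldl (fun row col =>
      row ++ List.replicate scale.toNat
        (decide ((((fontRows d1).getD r.toNat 0) >>> (4 - col).toNat) &&& 1 = 1))) row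
    let row := row ++ List.replicate gap.toNat false
    let row := (PySem.List.pyRange 0 5 1).foldl (fun row col =>
      row ++ List.replicate scale.toNat
        (decide ((((fontRows d2).getD r.toNat 0) >>> (4 - col).toNat) &&& 1 = 1))) row
    rows ++ List.replicate scale.toNat row) []

-- ===== PORT B =====
def get_number_bitmap_alt (number : Int) (scale : Int) : List (List Bool) :=
  let d1 := PySem.Int.floordiv number 10
  let d2 := PySem.Int.mod number 10
  -- bit-pack each font row: 5 bits of d1, one zero gap bit, 5 bits of d2 -> an 11-bit pattern
  let patterns : List Nat := (PySem.List.pyRange 0 7 1).map (fun r =>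
    (((fontRows d1).getD r.toNat 0) <<< 6) ||| ((fontRows d2).getD r.toNat 0))
  -- coordinate mapping: output pixel (y, x) reads logical cell (y // scale, x // scale)
  (PySem.List.pyRange 0 (7*scale) 1).map (fun y =>
    (PySem.List.pyRange 0 (11*scale) 1).map (fun x =>
      decide ((PySem.List.pyGetD patterns (PySem.Int.floordiv y scale) 0
        >>> (10 - PySem.Int.floordiv x scale).toNat) &&& 1 = 1)))

-- ===== PRECONDITION & SPEC =====
-- Pre_ excludes exactly the inputs on which Python A raises KeyError: number // 10 must be a
-- key of FONT_5x7, i.e. 0 ≤ number ≤ 99 (number % 10 is always in 0..9).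
def Pre_get_number_bitmap (number : Int) (scale : Int) : Prop := 0 ≤ number ∧ number ≤ 99
instance (number : Int) (scale : Int) : Decidable (Pre_get_number_bitmap number scale) := by unfold Pre_get_number_bitmap; infer_instance
def pvWitness_get_number_bitmap : Int × Int := (42, 2)

def Spec_get_number_bitmap (number : Int) (scale : Int) (out : List (List Bool)) : Prop := out = get_number_bitmap_alt number scale
instance (number : Int) (scale : Int) (out : List (List Bool)) : Decidable (Spec_get_number_bitmap number scale out) := by unfold Spec_get_number_bitmap; infer_instance

-- ===== CLAIM (what is proved, stated in full; the proofs are below) =====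
def Claim_equal_get_number_bitmap : Prop := ∀ (number : Int) (scale : Int), Dom_get_number_bitmap number scale → Pre_get_number_bitmap number scale → Spec_get_number_bitmap number scale (get_number_bitmap number scale)

-- ===== LEMMAS AND PROOFS =====

-- scaling a list pointwise by index division = replicating each element s times
theorem expand_div {α : Type} (f : Nat → α) (s : Nat) (hs : 0 < s) : ∀ (k : Nat),
    (List.range (k*s)).map (fun x => f (x / s)) = (List.range k).flatMap (fun c => List.replicate s (f c)) := by
  intro k
  induction k with
  | zero => simp
  | succ k ih =>
    have h1 : (k+1)*s = k*s + s := by ring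
    rw [h1, List.range_add, List.map_append, ih, List.range_succ, List.flatMap_append]
    congr 1
    simp only [List.map_map, List.flatMap_cons, List.flatMap_nil, List.append_nil]
    have : ∀ x ∈ List.range s, ((fun x => f (x / s)) ∘ (fun x => k*s + x)) x = f k := by
      intro x hx
      simp only [Function.comp]
      congr 1
      rw [Nat.add_comm, Nat.add_mul_div_right _ _ hs, Nat.div_eq_of_lt (List.mem_range.mp hx)]
      omega
    rw [List.map_congr_left this]
    simp

-- every FONT_5x7 row value fits in 5 bits
theorem fontRows_lt_32 (d : Int) (r : Nat) : (fontRows d).getD r 0 < 32 := by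
  have hmem : ∀ x ∈ fontRows d, x < 32 := by
    unfold fontRows
    split_ifs <;> simp
  rcases Nat.lt_or_ge r (fontRows d).length with h | h
  · exact hmem _ (by rw [List.getD_eq_getElem _ 0 h]; exact List.getElem_mem h)
  · rw [List.getD_eq_default _ _ h]; omega

-- one scaled output row from the packed pattern = A's incrementally built row
theorem row_eq (p1 p2 : Nat) (hp2 : p2 < 32) (s : Nat) :
    (List.range 11).flatMap (fun c => List.replicate s (decide ((((p1 <<< 6) ||| p2) >>> (10 - c)) &&& 1 = 1)))
    = ((([] : List Bool) ++ ([0,1,2,3,4] : List Int).flatMap (fun col => List.replicate s (decide ((p1 >>> (4 - col).toNat) &&& 1 = 1)))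
        ++ List.replicate s false)
       ++ ([0,1,2,3,4] : List Int).flatMap (fun col => List.replicate s (decide ((p2 >>> (4 - col).toNat) &&& 1 = 1)))) := by
  have e5 : p2.testBit 5 = false := Nat.testBit_eq_false_of_lt (by omega)
  have e6 : p2.testBit 6 = false := Nat.testBit_eq_false_of_lt (by omega)
  have e7 : p2.testBit 7 = false := Nat.testBit_eq_false_of_lt (by omega)
  have e8 : p2.testBit 8 = false := Nat.testBit_eq_false_of_lt (by omega)
  have e9 : p2.testBit 9 = false := Nat.testBit_eq_false_of_lt (by omega)
  have e10 : p2.testBit 10 = false := Nat.testBit_eq_false_of_lt (by omega)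
  simp [show List.range 11 = [0,1,2,3,4,5,6,7,8,9,10] from rfl,
    Nat.testBit_or, Nat.testBit_shiftLeft, e5, e6, e7, e8, e9, e10,
    List.append_assoc]

-- B's coordinate-mapped output, rewritten as a flatMap of replicated logical rows/cells
theorem alt_canon (number : Int) (s : Nat) (hs : 0 < s) :
    get_number_bitmap_alt number (s : Int) = (List.range 7).flatMap (fun r =>
      List.replicate s ((List.range 11).flatMap (fun c =>
        List.replicate s (decide ((((((fontRows (PySem.Int.floordiv number 10)).getD r 0) <<< 6)
          ||| ((fontRows (PySem.Int.mod number 10)).getD r 0)) >>> (10 - c)) &&& 1 = 1))))) := by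
  simp only [get_number_bitmap_alt]
  rw [PySem.List.pyRange_one 0 (7*(s:Int)), List.map_map,
      show ((7*(s:Int) - 0).toNat) = 7*s by omega,
      ← expand_div _ s hs 7]
  apply List.map_congr_left
  intro k hk
  have hk7 : k / s < 7 := Nat.div_lt_of_lt_mul (by simpa [Nat.mul_comm] using List.mem_range.mp hk)
  simp only [Function.comp, zero_add, PySem.Int.floordiv_natCast]
  rw [PySem.List.pyGetD_map_pyRange_of_nonneg _ 7 _ _ (by positivity) (by exact_mod_cast hk7)]
  simp only [Int.toNat_natCast]
  rw [PySem.List.pyRange_one 0 (11*(s:Int)), List.map_map,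
      show ((11*(s:Int) - 0).toNat) = 11*s by omega,
      ← expand_div _ s hs 11]
  apply List.map_congr_left
  intro x hx
  have hx11 : x / s < 11 := Nat.div_lt_of_lt_mul (by simpa [Nat.mul_comm] using List.mem_range.mp hx)
  simp only [Function.comp, zero_add, PySem.Int.floordiv_natCast]
  rw [show ((10:Int) - ((x/s : Nat) : Int)).toNat = 10 - x/s by omega]

theorem ports_agree (number scale : Int) :
    get_number_bitmap number scale = get_number_bitmap_alt number scale := by
  rcases (by omega : scale ≤ 0 ∨ 0 < scale) with hs | hs
  · -- scale ≤ 0: Python's [x]*scale and range(7*scale) are empty, both sides return []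
    have ht : scale.toNat = 0 := Int.toNat_eq_zero.mpr hs
    have hB : PySem.List.pyRange 0 (7*scale) 1 = [] := PySem.List.pyRange_one_eq_nil (by omega)
    simp [get_number_bitmap, get_number_bitmap_alt, ht, hB,
      show PySem.List.pyRange 0 7 1 = [0,1,2,3,4,5,6] from by decide, List.foldl]
  · obtain ⟨s, rfl⟩ : ∃ s : Nat, scale = (s : Int) := ⟨scale.toNat, (Int.toNat_of_nonneg hs.le).symm⟩
    have hs' : 0 < s := by exact_mod_cast hs
    rw [alt_canon number s hs']
    simp only [get_number_bitmap,
      show PySem.List.pyRange 0 7 1 = [0,1,2,3,4,5,6] from by decide,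
      show PySem.List.pyRange 0 5 1 = [0,1,2,3,4] from by decide,
      PySem.List.foldl_append_eq_flatMap, Int.toNat_natCast, List.nil_append]
    have hrow : ∀ r : Nat,
        (List.range 11).flatMap (fun c =>
          List.replicate s (decide ((((((fontRows (PySem.Int.floordiv number 10)).getD r 0) <<< 6)
            ||| ((fontRows (PySem.Int.mod number 10)).getD r 0)) >>> (10 - c)) &&& 1 = 1)))
        = ((([] : List Bool) ++ ([0,1,2,3,4] : List Int).flatMap (fun col =>
              List.replicate s (decide ((((fontRows (PySem.Int.floordiv number 10)).getD r 0) >>> (4 - col).toNat) &&& 1 = 1)))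
            ++ List.replicate s false)
           ++ ([0,1,2,3,4] : List Int).flatMap (fun col =>
              List.replicate s (decide ((((fontRows (PySem.Int.mod number 10)).getD r 0) >>> (4 - col).toNat) &&& 1 = 1)))) :=
      fun r => row_eq _ _ (fontRows_lt_32 _ r) s
    simp only [hrow]
    simp [show List.range 7 = [0,1,2,3,4,5,6] from rfl, List.append_assoc]
    rfl

-- ===== VERDICT (by name: the statement is the Claim_ definition above) =====
theorem get_number_bitmap_spec : Claim_equal_get_number_bitmap := by
  intro number scale _ _
  exact ports_agree number scale
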